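-- pv_equiv track=rewrite | github.com/dpkp/kafka-python | kafka/benchmarks/varint_speed.py | size_of_varint_1
-- ===== SOURCE A (Python) =====
-- def size_of_varint_1(value):
--     """ Number of bytes needed to encode an integer in variable-length format.
--     """
--     value = (value << 1) ^ (value >> 63)
--     res = 0
--     while True:
--         res += 1
--         value = value >> 7
--         if value == 0:
--             break
--     return res
-- ===== SOURCE B (Python) =====
-- def size_of_varint_1(value):
--     """ Number of bytes needed to encode an integer in variable-length format.
--     """
--     value = (value << 1) ^ (value >> 63)
--     return max(1, (value.bit_length() + 6) // 7)
-- ===== Notes on version B (the rewrite author's own statement) =====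
-- stated objective: simpler
-- what changed: Replaces the shift-and-count loop with a closed-form byte count derived from the zigzagged value's bit length: max(1, (bit_length + 6) // 7).
import Mathlib
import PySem

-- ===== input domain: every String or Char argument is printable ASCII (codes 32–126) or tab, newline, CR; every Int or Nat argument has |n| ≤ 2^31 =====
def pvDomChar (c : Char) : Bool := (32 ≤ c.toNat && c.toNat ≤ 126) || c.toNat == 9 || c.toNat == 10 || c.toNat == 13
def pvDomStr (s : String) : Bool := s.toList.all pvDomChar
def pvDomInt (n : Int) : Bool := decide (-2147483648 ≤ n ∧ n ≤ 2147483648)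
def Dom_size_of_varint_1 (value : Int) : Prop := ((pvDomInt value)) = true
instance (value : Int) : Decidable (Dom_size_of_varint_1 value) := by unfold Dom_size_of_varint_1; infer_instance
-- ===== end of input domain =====

-- B replaces A's shift-and-count loop with a closed-form byte count from the zigzagged value's bit length (simpler).


-- ===== PORT A =====
-- the 'while True' loop: res += 1; value >>= 7; break when value == 0.
-- The fuel only makes the recursion total; 128 iterations are never exhausted on
-- inputs where the Python loop terminates (it runs at most 10 times there).
def pvLoopA : Nat → Int → Int → Int
  | 0, _, res => res
  | fuel + 1, value, res =>
    let res := res + 1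
    let value := value >>> 7
    if value = 0 then res else pvLoopA fuel value res

def size_of_varint_1 (value : Int) : Int :=
  pvLoopA 128 (PySem.Int.bxor (value <<< 1) (value >>> 63)) 0

-- ===== PORT B =====
def size_of_varint_1_alt (value : Int) : Int :=
  let value := PySem.Int.bxor (value <<< 1) (value >>> 63)
  ((max 1 ((PySem.Int.bitLength value + 6) / 7) : Nat) : Int)

-- ===== PRECONDITION & SPEC =====
def Spec_size_of_varint_1 (value : Int) (out : Int) : Prop := out = size_of_varint_1_alt value
instance (value : Int) (out : Int) : Decidable (Spec_size_of_varint_1 value out) := by unfold Spec_size_of_varint_1; infer_instance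

-- ===== CLAIM (what is proved, stated in full; the proofs are below) =====
def Claim_equal_size_of_varint_1 : Prop := ∀ (value : Int), Dom_size_of_varint_1 value → Spec_size_of_varint_1 value (size_of_varint_1 value)

-- ===== LEMMAS AND PROOFS =====

-- one halving step of bitLength, phrased with '/' (ediv)
theorem pv_bl_half (v : Int) (h : 0 < v) :
    PySem.Int.bitLength v = PySem.Int.bitLength (v / 2) + 1 := by
  rw [PySem.Int.bitLength_of_pos h]
  simp [PySem.Int.floordiv, Int.fdiv_eq_ediv]

-- seven halvings: dividing by 128 removes exactly 7 bits
theorem pv_bl_div128 (v : Int) (h : 128 ≤ v) :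
    PySem.Int.bitLength v = PySem.Int.bitLength (v / 128) + 7 := by
  rw [pv_bl_half v (by omega),
      pv_bl_half (v / 2) (by omega),
      pv_bl_half (v / 2 / 2) (by omega),
      pv_bl_half (v / 2 / 2 / 2) (by omega),
      pv_bl_half (v / 2 / 2 / 2 / 2) (by omega),
      pv_bl_half (v / 2 / 2 / 2 / 2 / 2) (by omega),
      pv_bl_half (v / 2 / 2 / 2 / 2 / 2 / 2) (by omega)]
  have : v / 2 / 2 / 2 / 2 / 2 / 2 / 2 = v / 128 := by omega
  rw [this]

theorem pv_bl_pos {v : Int} (h : v ≠ 0) : 0 < PySem.Int.bitLength v := by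
  by_contra hc
  have h1 := PySem.Int.lt_two_pow_bitLength v
  have : PySem.Int.bitLength v = 0 := by omega
  rw [this] at h1
  simp at h1
  omega

-- the loop counts exactly max 1 ⌈bitLength/7⌉ iterations on nonnegative input
theorem pv_loop_count (fuel : Nat) : ∀ (v res : Int), 0 ≤ v → v.natAbs < 2 ^ (7 * fuel) →
    pvLoopA (fuel + 1) v res = res + ((max 1 ((PySem.Int.bitLength v + 6) / 7) : Nat) : Int) := by
  induction fuel with
  | zero =>
    intro v res hv hb
    have : v = 0 := by simp at hb; omega
    subst this
    simp [pvLoopA, PySem.Int.bitLength_zero]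
  | succ n ih =>
    intro v res hv hb
    have hsr : v >>> (7:Int) = v / 128 := by
      rw [show (7:Int) = ((7:Nat):Int) by norm_num, Int.shiftRight_natCast_right,
          Int.shiftRight_eq_div_pow]; norm_num
    rw [show pvLoopA (n + 1 + 1) v res
          = (if v >>> (7:Int) = 0 then res + 1 else pvLoopA (n + 1) (v >>> (7:Int)) (res + 1))
        from rfl, hsr]
    by_cases h0 : v / 128 = 0
    · -- v < 128: one byte
      rw [if_pos h0]
      have hv128 : v < 128 := by omega
      have hbl : PySem.Int.bitLength v ≤ 7 := by
        by_cases hz : v = 0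
        · subst hz; simp [PySem.Int.bitLength_zero]
        · have h1 := PySem.Int.two_pow_bitLength_le v hz
          by_contra hc
          have h8 : 8 ≤ PySem.Int.bitLength v := by omega
          have : (2:Nat) ^ 7 ≤ 2 ^ (PySem.Int.bitLength v - 1) :=
            Nat.pow_le_pow_right (by norm_num) (by omega)
          have : (128:Nat) ≤ v.natAbs := by
            calc (128:Nat) = 2 ^ 7 := by norm_num
            _ ≤ 2 ^ (PySem.Int.bitLength v - 1) := this
            _ ≤ v.natAbs := h1
          omega
      have : (max 1 ((PySem.Int.bitLength v + 6) / 7) : Nat) = 1 := by omega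
      rw [this]
      norm_num
    · rw [if_neg h0]
      have hv' : 0 ≤ v / 128 := by omega
      have hb' : (v / 128).natAbs < 2 ^ (7 * n) := by
        have : (2:Nat) ^ (7 * (n+1)) = 2 ^ (7 * n) * 128 := by
          rw [show 7 * (n+1) = 7 * n + 7 by ring, pow_add]; norm_num
        rw [this] at hb
        omega
      rw [ih (v / 128) (res + 1) hv' hb']
      have h128 : 128 ≤ v := by omega
      rw [pv_bl_div128 v h128]
      have hblp : 0 < PySem.Int.bitLength (v / 128) := pv_bl_pos (by omega)
      have harith : (max 1 ((PySem.Int.bitLength (v / 128) + 7 + 6) / 7) : Nat)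
          = (max 1 ((PySem.Int.bitLength (v / 128) + 6) / 7) : Nat) + 1 := by omega
      rw [harith]
      push_cast
      ring

-- bounds on the zigzag transform within the domain
theorem pv_zigzag_bounds (value : Int) (h1 : -2147483648 ≤ value) (h2 : value ≤ 2147483648) :
    0 ≤ PySem.Int.bxor (value <<< 1) (value >>> 63) ∧
    PySem.Int.bxor (value <<< 1) (value >>> 63) ≤ 2 ^ 33 := by
  have hsl : value <<< (1:Int) = 2 * value := by
    rw [show (1:Int) = ((1:Nat):Int) by norm_num, Int.shiftLeft_natCast_right,
        Int.shiftLeft_eq]; ring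
  have hsr : value >>> (63:Int) = value / 2 ^ 63 := by
    rw [show (63:Int) = ((63:Nat):Int) by norm_num, Int.shiftRight_natCast_right,
        Int.shiftRight_eq_div_pow]; norm_num
  by_cases hv : 0 ≤ value
  · have : value / 2 ^ 63 = 0 := by omega
    rw [hsl, hsr, this]
    simp [PySem.Int.bxor, hv, Int.toNat_of_nonneg (by omega : (0:Int) ≤ 2 * value)]
    omega
  · have : value / 2 ^ 63 = -1 := by omega
    rw [hsl, hsr, this]
    have hneg : ¬ (0 : Int) ≤ 2 * value := by omega
    simp only [PySem.Int.bxor, if_neg hneg, if_neg (by norm_num : ¬ (0:Int) ≤ -1)]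
    norm_num
    omega

-- ===== VERDICT (by name: the statement is the Claim_ definition above) =====
theorem size_of_varint_1_spec : Claim_equal_size_of_varint_1 := by
  intro value hdom
  have hd : -2147483648 ≤ value ∧ value ≤ 2147483648 := by
    have := of_decide_eq_true hdom
    exact this
  obtain ⟨hlo, hhi⟩ := hd
  obtain ⟨hz0, hz1⟩ := pv_zigzag_bounds value hlo hhi
  show size_of_varint_1 value = size_of_varint_1_alt value
  unfold size_of_varint_1 size_of_varint_1_alt
  set z := PySem.Int.bxor (value <<< 1) (value >>> 63) with hz
  have hb : z.natAbs < 2 ^ (7 * 127) := by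
    have h33 : z.natAbs < 2 ^ 34 := by omega
    have : (2:Nat) ^ 34 ≤ 2 ^ (7 * 127) := Nat.pow_le_pow_right (by norm_num) (by norm_num)
    omega
  simpa using pv_loop_count 127 z 0 hz0 hb
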